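-- pv_equiv track=rewrite | github.com/jbham/law_dr | backend/app/app/Lambda_functions/mentions_extractor_refactored.py | is_year_in_date
-- ===== SOURCE A (Python) =====
-- def is_year_in_date(local_date_f):
--     # visit date should have a year
--     # in testing, we have identified that ctakes extracts measurements as dates
--     # for instance, 4-6 is extracted as a valid date 4-6-2019
--     # where year is the current year
--     # so let's check if year is present in the string ctakes found
--
--     start_year_for_visit_date = 1900
--     local_append_visit_date = False
--
--     while True:
--         if str(start_year_for_visit_date) in local_date_f:
--             local_append_visit_date = True
--             break
--         start_year_for_visit_date += 1
--
--         # we don't want to check eternity either, break after year 2100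
--         # hopefully, our app is used at least until 2100 :)
--         if start_year_for_visit_date > 2100:
--             break
--
--     return local_append_visit_date
-- ===== SOURCE B (Python) =====
-- def is_year_in_date(local_date_f):
--     # scan once: any 4-char window that is a number between 1900 and 2100?
--     for i in range(len(local_date_f) - 3):
--         w = local_date_f[i:i+4]
--         if w.isdigit() and "1900" <= w <= "2100":
--             return True
--     return False
-- ===== Notes on version B (the rewrite author's own statement) =====
-- stated objective: alternative
-- what changed: Instead of searching the whole string once for each of the 201 candidate year strings, B makes a single left-to-right pass testing each 4-character window for being a digit string lexicographically in the year range; same result, a genuinely different traversal.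
import Mathlib
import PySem

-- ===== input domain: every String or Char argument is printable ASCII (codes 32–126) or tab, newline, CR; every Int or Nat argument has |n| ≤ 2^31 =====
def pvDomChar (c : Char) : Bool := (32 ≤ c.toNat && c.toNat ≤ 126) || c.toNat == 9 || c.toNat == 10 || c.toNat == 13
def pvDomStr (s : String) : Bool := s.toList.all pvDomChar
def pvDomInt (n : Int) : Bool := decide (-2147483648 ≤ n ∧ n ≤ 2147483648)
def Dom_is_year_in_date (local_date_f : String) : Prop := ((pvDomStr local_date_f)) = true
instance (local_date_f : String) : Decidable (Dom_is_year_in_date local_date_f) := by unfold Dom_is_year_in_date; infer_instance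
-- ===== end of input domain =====

-- B replaces A's 201 per-year substring searches by a single left-to-right window scan of the string (return value only; neither version has side effects).

-- ===== PORT A =====
-- A's while-loop: try each year string 1900,1901,… as a substring, stop after 2100.
def yearLoopA (s : String) (y : Int) : Bool :=
  if PySem.Str.isIn (PySem.Int.toStr y) s then true
  else if y + 1 > 2100 then false
  else yearLoopA s (y + 1)
termination_by (2101 - y).toNat
decreasing_by omega

def is_year_in_date (local_date_f : String) : Bool :=
  yearLoopA local_date_f 1900

-- ===== PORT B =====
-- Python's `<=` on strings: code-point lexicographic comparison (exact for all code points).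
def lexLe : List Char → List Char → Bool
  | [], _ => true
  | _ :: _, [] => false
  | a :: as, b :: bs =>
      if a.toNat < b.toNat then true
      else if b.toNat < a.toNat then false
      else lexLe as bs

-- the loop body's test on a window w: w.isdigit() and "1900" <= w <= "2100"
def winOK (w : List Char) : Bool :=
  PySem.Chars.strIsdigit w && (lexLe ['1','9','0','0'] w && lexLe w ['2','1','0','0'])

-- B's `for i in range(len(local_date_f) - 3): …` with early return
def winLoopB (cs : List Char) (n i : Int) : Bool :=
  if i < n then
    if winOK (PySem.Chars.slice cs (some i) (some (i + 4))) then true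
    else winLoopB cs n (i + 1)
  else false
termination_by (n - i).toNat
decreasing_by omega

def is_year_in_date_alt (local_date_f : String) : Bool :=
  winLoopB local_date_f.toList (PySem.Str.len local_date_f - 3) 0

-- ===== PRECONDITION & SPEC =====
def Spec_is_year_in_date (local_date_f : String) (out : Bool) : Prop := out = is_year_in_date_alt local_date_f
instance (local_date_f : String) (out : Bool) : Decidable (Spec_is_year_in_date local_date_f out) := by unfold Spec_is_year_in_date; infer_instance

-- ===== CLAIM (what is proved, stated in full; the proofs are below) =====
def Claim_equal_is_year_in_date : Prop := ∀ (local_date_f : String), Dom_is_year_in_date local_date_f → Spec_is_year_in_date local_date_f (is_year_in_date local_date_f)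

-- ===== LEMMAS AND PROOFS =====

theorem yearLoopA_true_iff (s : String) :
    ∀ (k : Nat) (y : Int), y ≤ 2100 → (2100 - y).toNat = k →
      (yearLoopA s y = true ↔ ∃ v : Int, y ≤ v ∧ v ≤ 2100 ∧ PySem.Str.isIn (PySem.Int.toStr v) s = true) := by
  intro k
  induction k using Nat.strong_induction_on with
  | _ k ih =>
    intro y hy hk
    rw [yearLoopA]
    by_cases hin : PySem.Str.isIn (PySem.Int.toStr y) s = true
    · rw [if_pos hin]
      exact iff_of_true rfl ⟨y, le_refl y, hy, hin⟩
    · rw [if_neg hin]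
      by_cases hlast : y + 1 > 2100
      · rw [if_pos hlast]
        constructor
        · intro h; exact absurd h (by simp)
        · rintro ⟨v, h1, h2, h3⟩
          have hvy : v = y := by omega
          subst hvy; exact absurd h3 hin
      · rw [if_neg hlast]
        rw [ih (2100 - (y+1)).toNat (by omega) (y+1) (by omega) rfl]
        constructor
        · rintro ⟨v, h1, h2, h3⟩; exact ⟨v, by omega, h2, h3⟩
        · rintro ⟨v, h1, h2, h3⟩
          refine ⟨v, ?_, h2, h3⟩
          rcases eq_or_lt_of_le h1 with heq | hlt
          · subst heq; exact absurd h3 hin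
          · omega

theorem winLoopB_true_iff (cs : List Char) (n : Int) :
    ∀ (k : Nat) (i : Int), (n - i).toNat = k →
      (winLoopB cs n i = true ↔
        ∃ j : Int, i ≤ j ∧ j < n ∧ winOK (PySem.Chars.slice cs (some j) (some (j + 4))) = true) := by
  intro k
  induction k using Nat.strong_induction_on with
  | _ k ih =>
    intro i hk
    rw [winLoopB]
    by_cases hlt : i < n
    · rw [if_pos hlt]
      by_cases hok : winOK (PySem.Chars.slice cs (some i) (some (i + 4))) = true
      · rw [if_pos hok]
        exact iff_of_true rfl ⟨i, le_refl i, hlt, hok⟩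
      · rw [if_neg hok]
        rw [ih (n - (i+1)).toNat (by omega) (i+1) rfl]
        constructor
        · rintro ⟨j, h1, h2, h3⟩; exact ⟨j, by omega, h2, h3⟩
        · rintro ⟨j, h1, h2, h3⟩
          refine ⟨j, ?_, h2, h3⟩
          rcases eq_or_lt_of_le h1 with heq | hlt'
          · subst heq; exact absurd h3 hok
          · omega
    · rw [if_neg hlt]
      constructor
      · intro h; exact absurd h (by simp)
      · rintro ⟨j, h1, h2, _⟩; omega

-- a Dom character that Python's isdigit accepts is one of '0'..'9'
theorem ascii_digit (c : Char) (h1 : pvDomChar c = true)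
    (h2 : PySem.Chars.isdigit c = true) : ∃ k : Fin 10, c = Char.ofNat (48 + k) := by
  have hc : Char.ofNat c.toNat = c := Char.ofNat_toNat c
  have h48 : 48 ≤ c.toNat ∧ c.toNat ≤ 57 := by
    rw [← hc] at h2
    unfold pvDomChar at h1
    simp only [Bool.or_eq_true, Bool.and_eq_true, decide_eq_true_eq, beq_iff_eq] at h1
    generalize hn : c.toNat = n at h1 h2
    rcases h1 with (((⟨ha, hb⟩ | h1) | h1) | h1)
    · interval_cases n <;> revert h2 <;> decide
    all_goals (subst h1; revert h2; decide)
  refine ⟨⟨c.toNat - 48, by omega⟩, ?_⟩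
  show c = Char.ofNat (48 + (c.toNat - 48))
  rw [show 48 + (c.toNat - 48) = c.toNat from by omega, hc]

-- the decimal rendering of an in-range value is exactly its four digit characters
theorem toChars_digits : ∀ a b c d : Fin 10,
    (1900 ≤ 1000*(a:Int)+100*b+10*c+d ∧ 1000*(a:Int)+100*b+10*c+d ≤ 2100) →
    PySem.Int.toChars (1000*(a:Int)+100*b+10*c+d) =
      [Char.ofNat (48+a), Char.ofNat (48+b), Char.ofNat (48+c), Char.ofNat (48+d)] := by decide

-- the lexicographic window test on four digit characters is exactly the numeric range test
theorem lex_iff_range : ∀ a b c d : Fin 10,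
    (lexLe ['1','9','0','0'] [Char.ofNat (48+a), Char.ofNat (48+b), Char.ofNat (48+c), Char.ofNat (48+d)]
     && lexLe [Char.ofNat (48+a), Char.ofNat (48+b), Char.ofNat (48+c), Char.ofNat (48+d)] ['2','1','0','0']) = true
    ↔ (1900 ≤ 1000*(a:Int)+100*b+10*c+d ∧ 1000*(a:Int)+100*b+10*c+d ≤ 2100) := by decide

-- every candidate year string passes B's window test and has four characters
theorem winOK_toChars : (PySem.List.pyRange 1900 2101 1).all
    (fun v => winOK (PySem.Int.toChars v) && ((PySem.Int.toChars v).length == 4)) = true := by decide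

-- ===== VERDICT (by name: the statement is the Claim_ definition above) =====
theorem is_year_in_date_spec : Claim_equal_is_year_in_date := by
  intro s hdom
  unfold Spec_is_year_in_date is_year_in_date is_year_in_date_alt
  rw [Bool.eq_iff_iff]
  rw [yearLoopA_true_iff s ((2100 - (1900:Int)).toNat) 1900 (by omega) rfl]
  rw [winLoopB_true_iff s.toList (PySem.Str.len s - 3) (PySem.Str.len s - 3 - 0).toNat 0 rfl]
  have hlen : PySem.Str.len s = (s.toList.length : Int) := by simp
  have hCL : ∀ (a b : Option Int), PySem.Chars.slice s.toList a b = PySem.List.slice s.toList a b :=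
    fun a b => rfl
  constructor
  · rintro ⟨v, h1, h2, h3⟩
    have hv : v ∈ PySem.List.pyRange 1900 2101 1 := by
      rw [PySem.List.mem_pyRange_one]; omega
    have hkey := List.all_eq_true.mp winOK_toChars v hv
    simp only [Bool.and_eq_true, beq_iff_eq] at hkey
    obtain ⟨hok, hlen4⟩ := hkey
    rw [PySem.Str.isIn_iff_infix, PySem.Int.toList_toStr] at h3
    obtain ⟨pre, suf, hsplit⟩ := h3
    refine ⟨(pre.length : Int), by omega, ?_, ?_⟩
    · rw [hlen]
      have : s.toList.length = pre.length + 4 + suf.length := by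
        rw [← hsplit]; simp [hlen4]; omega
      omega
    · have h4 : ((pre.length : Int) + 4) = (((pre.length + 4 : Nat)) : Int) := by push_cast; ring
      rw [hCL, h4, PySem.List.slice_natCast, ← hsplit]
      have h44 : pre.length + 4 - pre.length = 4 := by omega
      rw [h44, List.append_assoc pre, List.drop_left, List.take_left' hlen4]
      exact hok
  · rintro ⟨j, h0, hj, hok⟩
    have hj' : j.toNat + 3 < s.toList.length := by omega
    have hslice : PySem.Chars.slice s.toList (some j) (some (j + 4)) =
        (s.toList.drop j.toNat).take 4 := by
      rw [hCL, PySem.List.slice_toNat s.toList h0 (by omega)]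
      congr 1; omega
    rw [hslice] at hok
    set w := (s.toList.drop j.toNat).take 4 with hw
    have hwlen : w.length = 4 := by
      rw [hw, List.length_take, List.length_drop]; omega
    have hwmem : ∀ c ∈ w, c ∈ s.toList := fun c hc =>
      List.mem_of_mem_drop (List.mem_of_mem_take hc)
    have hdrop : w ++ (s.toList.drop j.toNat).drop 4 = s.toList.drop j.toNat := by
      rw [hw, List.take_append_drop]
    match w, hwlen, hwmem, hdrop, hok with
    | [a, b, c, d], _, hwmem, hdrop, hok =>
      unfold winOK at hok
      simp only [Bool.and_eq_true] at hok
      obtain ⟨hdig, hlex1, hlex2⟩ := hok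
      simp [PySem.Chars.strIsdigit] at hdig
      obtain ⟨hda, hdb, hdc, hdd⟩ := hdig
      have hdom' := List.all_eq_true.mp hdom
      obtain ⟨ka, ha⟩ := ascii_digit a (hdom' a (hwmem a (by simp))) hda
      obtain ⟨kb, hb⟩ := ascii_digit b (hdom' b (hwmem b (by simp))) hdb
      obtain ⟨kc, hcc⟩ := ascii_digit c (hdom' c (hwmem c (by simp))) hdc
      obtain ⟨kd, hd⟩ := ascii_digit d (hdom' d (hwmem d (by simp))) hdd
      subst ha hb hcc hd
      have hrange := (lex_iff_range ka kb kc kd).mp (by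
        simp only [Bool.and_eq_true]
        exact ⟨hlex1, hlex2⟩)
      refine ⟨1000*(ka:Int)+100*kb+10*kc+kd, by omega, by omega, ?_⟩
      rw [PySem.Str.isIn_iff_infix, PySem.Int.toList_toStr, toChars_digits ka kb kc kd hrange]
      exact ⟨s.toList.take j.toNat, (s.toList.drop j.toNat).drop 4, by
        rw [List.append_assoc, hdrop, List.take_append_drop]⟩
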